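-- pv_equiv track=rewrite | github.com/ffancer/study_with_codewars_part2 | 7 kyu ⚠️Fusion Chamber Shutdown⚠️.py | burner
-- ===== SOURCE A (Python) =====
-- def burner(c, h, o):
--     water = 0
--     carbon_dioxide = 0
--     methane = 0
--
--     while h > 1 and o > 0:
--         h -= 2
--         o -= 1
--         water += 1
--
--     while c > 0 and o > 1:
--         c -= 1
--         o -= 2
--         carbon_dioxide += 1
--
--     while c > 0 and h > 3:
--         c -= 1
--         h -= 4
--         methane += 1
--
--
--     return water, carbon_dioxide, methane
-- ===== SOURCE B (Python) =====
-- def burner(c, h, o):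
--     # closed-form: each burn stage is min(available reactant ratios), no loops
--     water = max(0, min(h // 2, o))
--     h -= 2 * water
--     o -= water
--     carbon_dioxide = max(0, min(c, o // 2))
--     c -= carbon_dioxide
--     methane = max(0, min(c, h // 4))
--     return water, carbon_dioxide, methane
-- ===== Notes on version B (the rewrite author's own statement) =====
-- stated objective: faster
-- what changed: replaced the three unit-step while loops by closed-form arithmetic (max 0 (min ...) with integer division) for each stage
import Mathlib
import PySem

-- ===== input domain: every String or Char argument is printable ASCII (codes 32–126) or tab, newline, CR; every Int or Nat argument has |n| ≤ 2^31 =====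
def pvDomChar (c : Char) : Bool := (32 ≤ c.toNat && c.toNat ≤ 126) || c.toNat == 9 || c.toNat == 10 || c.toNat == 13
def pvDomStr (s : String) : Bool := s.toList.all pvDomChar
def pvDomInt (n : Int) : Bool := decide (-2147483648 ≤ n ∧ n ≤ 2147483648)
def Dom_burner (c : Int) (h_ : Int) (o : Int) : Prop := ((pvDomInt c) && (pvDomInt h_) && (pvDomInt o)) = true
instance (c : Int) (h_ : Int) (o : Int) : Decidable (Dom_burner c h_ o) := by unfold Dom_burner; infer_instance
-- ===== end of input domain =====

-- ===== PORT A =====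
-- B replaces A's three unit-step while loops by closed-form min/floordiv arithmetic (faster).
-- while h > 1 and o > 0: h -= 2; o -= 1; water += 1
def burnerLoop1 (h_ o water : Int) : Int × Int × Int :=
  if h_ > 1 ∧ o > 0 then burnerLoop1 (h_ - 2) (o - 1) (water + 1) else (h_, o, water)
  termination_by o.toNat
  decreasing_by omega

-- while c > 0 and o > 1: c -= 1; o -= 2; carbon_dioxide += 1
def burnerLoop2 (c o cd : Int) : Int × Int × Int :=
  if c > 0 ∧ o > 1 then burnerLoop2 (c - 1) (o - 2) (cd + 1) else (c, o, cd)
  termination_by c.toNat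
  decreasing_by omega

-- while c > 0 and h > 3: c -= 1; h -= 4; methane += 1
def burnerLoop3 (c h_ me : Int) : Int × Int × Int :=
  if c > 0 ∧ h_ > 3 then burnerLoop3 (c - 1) (h_ - 4) (me + 1) else (c, h_, me)
  termination_by c.toNat
  decreasing_by omega

def burner (c : Int) (h_ : Int) (o : Int) : List Int :=
  let r1 := burnerLoop1 h_ o 0
  let r2 := burnerLoop2 c r1.2.1 0
  let r3 := burnerLoop3 r2.1 r1.1 0
  [r1.2.2, r2.2.2, r3.2.2]

-- ===== PORT B =====
def burner_alt (c : Int) (h_ : Int) (o : Int) : List Int :=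
  let water := max 0 (min (PySem.Int.floordiv h_ 2) o)
  let h2 := h_ - 2 * water
  let o2 := o - water
  let cd := max 0 (min c (PySem.Int.floordiv o2 2))
  let c2 := c - cd
  let me := max 0 (min c2 (PySem.Int.floordiv h2 4))
  [water, cd, me]

-- ===== PRECONDITION & SPEC =====
def Spec_burner (c : Int) (h_ : Int) (o : Int) (out : List Int) : Prop := out = burner_alt c h_ o
instance (c : Int) (h_ : Int) (o : Int) (out : List Int) : Decidable (Spec_burner c h_ o out) := by unfold Spec_burner; infer_instance

-- ===== CLAIM (what is proved, stated in full; the proofs are below) =====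
def Claim_equal_burner : Prop := ∀ (c : Int) (h_ : Int) (o : Int), Dom_burner c h_ o → Spec_burner c h_ o (burner c h_ o)

-- ===== LEMMAS AND PROOFS =====
theorem fdiv_eq_ediv_two (a : Int) : PySem.Int.floordiv a 2 = a / 2 := by
  simp [PySem.Int.floordiv]
  exact Int.fdiv_eq_ediv_of_nonneg _ (by norm_num)

theorem fdiv_eq_ediv_four (a : Int) : PySem.Int.floordiv a 4 = a / 4 := by
  simp [PySem.Int.floordiv]
  exact Int.fdiv_eq_ediv_of_nonneg _ (by norm_num)

theorem burnerLoop1_eq (h_ o w : Int) :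
    burnerLoop1 h_ o w =
      (h_ - 2 * max 0 (min (h_ / 2) o), o - max 0 (min (h_ / 2) o), w + max 0 (min (h_ / 2) o)) := by
  induction h_, o, w using burnerLoop1.induct with
  | case1 h_ o w hc ih =>
    rw [burnerLoop1, if_pos hc, ih]
    refine Prod.ext ?_ (Prod.ext ?_ ?_) <;> simp <;> omega
  | case2 h_ o w hc =>
    rw [burnerLoop1, if_neg hc]
    refine Prod.ext ?_ (Prod.ext ?_ ?_) <;> simp <;> omega

theorem burnerLoop2_eq (c o cd : Int) :
    burnerLoop2 c o cd =
      (c - max 0 (min c (o / 2)), o - 2 * max 0 (min c (o / 2)), cd + max 0 (min c (o / 2))) := by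
  induction c, o, cd using burnerLoop2.induct with
  | case1 c o cd hc ih =>
    rw [burnerLoop2, if_pos hc, ih]
    refine Prod.ext ?_ (Prod.ext ?_ ?_) <;> simp <;> omega
  | case2 c o cd hc =>
    rw [burnerLoop2, if_neg hc]
    refine Prod.ext ?_ (Prod.ext ?_ ?_) <;> simp <;> omega

theorem burnerLoop3_eq (c h_ me : Int) :
    burnerLoop3 c h_ me =
      (c - max 0 (min c (h_ / 4)), h_ - 4 * max 0 (min c (h_ / 4)), me + max 0 (min c (h_ / 4))) := by
  induction c, h_, me using burnerLoop3.induct with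
  | case1 c h_ me hc ih =>
    rw [burnerLoop3, if_pos hc, ih]
    refine Prod.ext ?_ (Prod.ext ?_ ?_) <;> simp <;> omega
  | case2 c h_ me hc =>
    rw [burnerLoop3, if_neg hc]
    refine Prod.ext ?_ (Prod.ext ?_ ?_) <;> simp <;> omega

-- ===== VERDICT (by name: the statement is the Claim_ definition above) =====
theorem burner_spec : Claim_equal_burner := by
  intro c h_ o _
  unfold Spec_burner burner burner_alt
  simp only [burnerLoop1_eq, burnerLoop2_eq, burnerLoop3_eq, fdiv_eq_ediv_two,
    fdiv_eq_ediv_four, zero_add]
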